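-- pv_equiv track=rewrite | github.com/seanchatmangpt/AutoGPT | autogpts/test_agent/forge/sdk/benchmarks/matrix_overnight/import_libraries_validate_input_functionpy_2023-10-24_13-32-29.py | suggest_optimization
-- ===== SOURCE A (Python) =====
-- def suggest_optimization(input):
--     """
--     Provides suggestions for code optimization and restructuring.
--
--     Args:
--         input (list): List of lists with strings as elements.
--
--     Returns:
--         list: List of suggestions for code optimization and restructuring.
--     """
--     suggestions = []
--
--     # Check for nested loops
--     for l in input:
--         if any(isinstance(s, list) for s in l):
--             suggestions.append(
--                 "Consider using itertools.product or itertools.combinations instead of nested loops."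
--             )
--             break
--
--     # Check for redundant code
--     for l in input:
--         if len(set(l)) != len(l):
--             suggestions.append(
--                 "Consider removing any duplicate elements from the input."
--             )
--             break
--
--     # Check for inefficient code
--     for l in input:
--         if any(len(s) > 50 for s in l):
--             suggestions.append("Consider breaking up long strings into smaller chunks.")
--             break
--
--     return suggestions
-- ===== SOURCE B (Python) =====
-- def suggest_optimization(input):
--     has_nested = has_dup = has_long = False
--     for l in input:
--         if not has_nested and any(isinstance(s, list) for s in l):
--             has_nested = True
--         if not has_dup and len(set(l)) != len(l):
--             has_dup = True
--         if not has_long and any(len(s) > 50 for s in l):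
--             has_long = True
--     suggestions = []
--     if has_nested:
--         suggestions.append(
--             "Consider using itertools.product or itertools.combinations instead of nested loops."
--         )
--     if has_dup:
--         suggestions.append("Consider removing any duplicate elements from the input.")
--     if has_long:
--         suggestions.append("Consider breaking up long strings into smaller chunks.")
--     return suggestions
-- ===== Notes on version B (the rewrite author's own statement) =====
-- stated objective: alternative
-- what changed: Replaces A's three sequential early-break scans over the input with a single pass maintaining three guarded boolean flags, appending the fixed-order suggestions once at the end.
import Mathlib
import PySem

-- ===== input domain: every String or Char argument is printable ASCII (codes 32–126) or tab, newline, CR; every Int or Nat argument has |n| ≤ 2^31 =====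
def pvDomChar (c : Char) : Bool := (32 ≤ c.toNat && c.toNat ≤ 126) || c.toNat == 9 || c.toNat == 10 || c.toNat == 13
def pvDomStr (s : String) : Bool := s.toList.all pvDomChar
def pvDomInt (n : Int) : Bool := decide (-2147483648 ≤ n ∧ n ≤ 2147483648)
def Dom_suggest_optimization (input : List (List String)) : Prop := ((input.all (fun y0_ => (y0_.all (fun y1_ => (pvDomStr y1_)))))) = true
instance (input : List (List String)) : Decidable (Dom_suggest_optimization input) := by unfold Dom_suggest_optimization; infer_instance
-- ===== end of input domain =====

-- B fuses A's three sequential early-break scans into one pass carrying three guarded boolean flags (alternative decomposition; same cost).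

-- ===== PORT A =====
-- loop 'for l in input: if <check>: suggestions.append(msg); break' — recursion with break
def pvLoopA (check : List String → Bool) (msg : String) : List (List String) → List String → List String
  | [], acc => acc
  | l :: rest, acc => if check l then acc ++ [msg] else pvLoopA check msg rest acc

-- isinstance(s, list) on an element of a list[str] is always False
def pvCheckNested (l : List String) : Bool := l.any (fun _ => false)
def pvCheckDup (l : List String) : Bool := decide (PySem.Set.len (PySem.Set.ofList l) ≠ PySem.List.len l)
def pvCheckLong (l : List String) : Bool := l.any (fun s => decide (PySem.Str.len s > 50))

def suggest_optimization (input : List (List String)) : List String :=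
  let suggestions : List String := []
  let suggestions := pvLoopA pvCheckNested "Consider using itertools.product or itertools.combinations instead of nested loops." input suggestions
  let suggestions := pvLoopA pvCheckDup "Consider removing any duplicate elements from the input." input suggestions
  let suggestions := pvLoopA pvCheckLong "Consider breaking up long strings into smaller chunks." input suggestions
  suggestions

-- ===== PORT B =====
-- single pass over input maintaining the three guarded flags
def pvLoopB : List (List String) → Bool → Bool → Bool → Bool × Bool × Bool
  | [], n, d, g => (n, d, g)
  | l :: rest, n, d, g =>
    let n := if !n && pvCheckNested l then true else n
    let d := if !d && pvCheckDup l then true else d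
    let g := if !g && pvCheckLong l then true else g
    pvLoopB rest n d g

def suggest_optimization_alt (input : List (List String)) : List String :=
  let (n, d, g) := pvLoopB input false false false
  let suggestions : List String := []
  let suggestions := if n then suggestions ++ ["Consider using itertools.product or itertools.combinations instead of nested loops."] else suggestions
  let suggestions := if d then suggestions ++ ["Consider removing any duplicate elements from the input."] else suggestions
  let suggestions := if g then suggestions ++ ["Consider breaking up long strings into smaller chunks."] else suggestions
  suggestions

-- ===== PRECONDITION & SPEC =====
def Spec_suggest_optimization (input : List (List String)) (out : List String) : Prop := out = suggest_optimization_alt input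
instance (input : List (List String)) (out : List String) : Decidable (Spec_suggest_optimization input out) := by unfold Spec_suggest_optimization; infer_instance

-- ===== CLAIM (what is proved, stated in full; the proofs are below) =====
def Claim_equal_suggest_optimization : Prop := ∀ (input : List (List String)), Dom_suggest_optimization input → Spec_suggest_optimization input (suggest_optimization input)

-- ===== LEMMAS AND PROOFS =====

-- ===== VERDICT (by name: the statement is the Claim_ definition above) =====
lemma pvLoopA_char (check : List String → Bool) (msg : String) (xs : List (List String)) (acc : List String) :
    pvLoopA check msg xs acc = acc ++ (if xs.any check then [msg] else []) := by
  induction xs with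
  | nil => simp [pvLoopA]
  | cons l rest ih =>
    simp only [pvLoopA, List.any_cons]
    by_cases h : check l = true <;> simp [h, ih]

lemma pvLoopB_char (xs : List (List String)) (n d g : Bool) :
    pvLoopB xs n d g = (n || xs.any pvCheckNested, d || xs.any pvCheckDup, g || xs.any pvCheckLong) := by
  induction xs generalizing n d g with
  | nil => simp [pvLoopB]
  | cons l rest ih =>
    simp only [pvLoopB, List.any_cons, ih]
    cases n <;> cases d <;> cases g <;>
      cases h1 : pvCheckNested l <;> cases h2 : pvCheckDup l <;> cases h3 : pvCheckLong l <;> simp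

theorem suggest_optimization_spec : Claim_equal_suggest_optimization := by
  intro input _
  unfold Spec_suggest_optimization suggest_optimization suggest_optimization_alt
  simp only [pvLoopB_char, pvLoopA_char, Bool.false_or]
  cases input.any pvCheckNested <;> cases input.any pvCheckDup <;> cases input.any pvCheckLong <;> simp
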